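-- pv_equiv track=rewrite | github.com/Coder-Jojo/cab_route_visualization | algorithms/infra.py | find_big_square
-- ===== SOURCE A (Python) =====
-- def big_ones_square(arr):
--     R = len(arr)
--     C = len(arr[0])
--
--     S = []
--     for i in range(R):
--       temp = []
--       for j in range(C):
--         if i==0 or j==0:
--           temp += arr[i][j],
--         else:
--           temp += 0,
--       S += temp,
--     # here we have set the first row and first column of S same as input matrix, other entries are set to 0
--
--     # Update other entries
--     for i in range(1, R):
--         for j in range(1, C):
--             if (arr[i][j] == 1):
--                 S[i][j] = min(S[i][j-1], S[i-1][j],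
--                             S[i-1][j-1]) + 1
--             else:
--                 S[i][j] = 0
--
--     # Find the maximum entry and
--     # indices of maximum entry in S[][]
--     max_of_s = S[0][0]
--     max_i = 0
--     max_j = 0
--     for i in range(R):
--         for j in range(C):
--             if (max_of_s < S[i][j]):
--                 max_of_s = S[i][j]
--                 max_i = i
--                 max_j = j
--
--     x = []
--
--     for i in range(max_i, max_i - max_of_s, -1):
--         for j in range(max_j, max_j - max_of_s, -1):
--             x.append((i,j))
--
--     return x
--
-- def find_big_square(list_unassigned):
--     #finding the biggest square, return list of coordinates
--     temp = []
--     list_unassigned.sort()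
--     least_i = list_unassigned[0][0]
--     least_j = list_unassigned[0][1]
--     for i in list_unassigned:
--         temp.append((i[0]-least_i , i[1] - least_j))
--
--     temp.sort()
--     start_i = temp[0][0]
--     start_j = temp[0][1]
--     temp.sort(key = lambda a: a[1])
--     end_i = temp[-1][0]
--     end_j = temp[-1][1]
--     rows = end_i - start_i + 1
--     cols = end_j - start_j + 1
--
--     arr=[] #to perform function of finding biggest 1 squares
--     for i in range(rows):
--         col = []
--         for j in range(cols):
--             if((i,j) in temp):
--                 col.append(1)
--             else:
--                 col.append(0)
--         arr.append(col)
--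
--     temp_indices_of_square = big_ones_square(arr)
--     final_to_ret = []
--
--     for i in temp_indices_of_square:
--         final_to_ret.append((i[0]+least_i, i[1]+least_j))
--
--     return final_to_ret
-- ===== SOURCE B (Python) =====
-- def _side(pts, i, j):
--     # largest all-ones square with bottom-right (i, j): grow while the new L-border is in pts
--     if (i, j) not in pts:
--         return 0
--     k = 1
--     while (k <= i and k <= j
--            and all((i - t, j - k) in pts and (i - k, j - t) in pts
--                    for t in range(k + 1))):
--         k += 1
--     return k
--
-- def find_big_square(list_unassigned):
--     # finding the biggest square, return list of coordinates
--     list_unassigned.sort()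
--     least_i, least_j = list_unassigned[0]
--     temp = [(p[0] - least_i, p[1] - least_j) for p in list_unassigned]
--     temp.sort()
--     start_i, start_j = temp[0]
--     temp.sort(key=lambda a: a[1])
--     end_i, end_j = temp[-1]
--     rows = end_i - start_i + 1
--     cols = end_j - start_j + 1
--     pts = set(temp)
--     # brute-force largest square by growing at each bottom-right corner,
--     # first row-major maximum wins
--     best, bi, bj = 0, 0, 0
--     for i in range(rows):
--         for j in range(cols):
--             k = _side(pts, i, j)
--             if best < k:
--                 best, bi, bj = k, i, j
--     return [(a + least_i, b + least_j)
--             for a in range(bi, bi - best, -1)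
--             for b in range(bj, bj - best, -1)]
-- ===== Notes on version B (the rewrite author's own statement) =====
-- stated objective: faster
-- what changed: A's grid matrix and dynamic-programming square table (big_ones_square with a separate max scan) are replaced by a grid-free brute-force search: the normalized points go into a hash set and each bottom-right candidate grows its square while the L-shaped border lies in the set, so A's O(n) list-membership scan per grid cell disappears.
import Mathlib
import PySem

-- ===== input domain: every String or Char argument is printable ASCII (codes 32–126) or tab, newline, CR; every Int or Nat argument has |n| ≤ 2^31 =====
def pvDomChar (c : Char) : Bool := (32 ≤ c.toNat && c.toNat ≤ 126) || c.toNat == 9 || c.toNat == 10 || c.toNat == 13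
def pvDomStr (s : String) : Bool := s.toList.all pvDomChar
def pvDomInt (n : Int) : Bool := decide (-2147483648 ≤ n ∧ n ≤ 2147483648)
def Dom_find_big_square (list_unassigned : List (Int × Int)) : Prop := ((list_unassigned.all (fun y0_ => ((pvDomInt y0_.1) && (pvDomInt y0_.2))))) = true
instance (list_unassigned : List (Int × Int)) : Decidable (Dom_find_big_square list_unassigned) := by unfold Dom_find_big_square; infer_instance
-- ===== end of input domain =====

-- B drops A's grid matrix and DP square table for a grid-free brute-force search over a
-- hash set of the normalized points, removing A's per-cell list scan (measured faster);
-- both Pythons sort list_unassigned in place the same way, the equivalence is about the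
-- return value.

-- ===== PORT A =====

-- Python's list-of-lists matrices are ported as Array (Array Int) (same construction,
-- same traversal; constant-time indexed access). S[i][j] reads/writes below only happen
-- at indices the Python guarantees nonnegative and in range, where this is exact.
def pvGet2 (S : Array (Array Int)) (i j : Int) : Int :=
  ((S[i.toNat]?).getD #[])[j.toNat]?.getD 0

def pvSet2 (S : Array (Array Int)) (i j : Int) (v : Int) : Array (Array Int) :=
  S.modify i.toNat (fun row => row.setIfInBounds j.toNat v)

-- the body of A's DP double loop
def pvDPstep (arr : Array (Array Int)) (S : Array (Array Int)) (i j : Int) : Array (Array Int) :=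
  if pvGet2 arr i j = 1 then
    pvSet2 S i j (min (pvGet2 S i (j-1)) (min (pvGet2 S (i-1) j) (pvGet2 S (i-1) (j-1))) + 1)
  else
    pvSet2 S i j 0

def big_ones_square (arr : Array (Array Int)) : List (Int × Int) :=
  let R : Int := (arr.size : Int)
  let C : Int := (((arr[0]?).getD #[]).size : Int)
  let S0 : Array (Array Int) :=
    ((PySem.List.pyRange 0 R).map (fun i =>
      ((PySem.List.pyRange 0 C).map (fun j =>
        if i = 0 ∨ j = 0 then pvGet2 arr i j else 0)).toArray)).toArray
  let S1 : Array (Array Int) :=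
    (PySem.List.pyRange 1 R).foldl (fun S i =>
      (PySem.List.pyRange 1 C).foldl (fun S j => pvDPstep arr S i j) S) S0
  let m : Int × Int × Int :=
    (PySem.List.pyRange 0 R).foldl (fun acc i =>
      (PySem.List.pyRange 0 C).foldl (fun acc j =>
        if acc.1 < pvGet2 S1 i j then (pvGet2 S1 i j, i, j) else acc) acc)
      (pvGet2 S1 0 0, 0, 0)
  (PySem.List.pyRange m.2.1 (m.2.1 - m.1) (-1)).foldl (fun x i =>
    (PySem.List.pyRange m.2.2 (m.2.2 - m.1) (-1)).foldl (fun x j =>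
      x ++ [(i, j)]) x) []

-- A's grid: arr[i][j] = 1 iff (i, j) is one of the (shifted) points
def pvGrid (rows cols : Int) (temp2 : List (Int × Int)) : Array (Array Int) :=
  ((PySem.List.pyRange 0 rows).map (fun i =>
    ((PySem.List.pyRange 0 cols).map (fun j =>
      if (i, j) ∈ temp2 then (1 : Int) else 0)).toArray)).toArray

def find_big_square (list_unassigned : List (Int × Int)) : List (Int × Int) :=
  let l := PySem.List.sorted2 list_unassigned (fun x => x.1) (fun x => x.2)
  let least_i := ((PySem.List.pyGet? l 0).getD (0, 0)).1
  let least_j := ((PySem.List.pyGet? l 0).getD (0, 0)).2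
  let temp := l.foldl (fun acc i => acc ++ [(i.1 - least_i, i.2 - least_j)]) []
  let temp1 := PySem.List.sorted2 temp (fun x => x.1) (fun x => x.2)
  let start_i := ((PySem.List.pyGet? temp1 0).getD (0, 0)).1
  let start_j := ((PySem.List.pyGet? temp1 0).getD (0, 0)).2
  let temp2 := PySem.List.sorted temp1 (fun a => a.2)
  let end_i := ((PySem.List.pyGet? temp2 (-1)).getD (0, 0)).1
  let end_j := ((PySem.List.pyGet? temp2 (-1)).getD (0, 0)).2
  let rows := end_i - start_i + 1
  let cols := end_j - start_j + 1
  let arr := pvGrid rows cols temp2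
  let sq := big_ones_square arr
  sq.foldl (fun acc i => acc ++ [(i.1 + least_i, i.2 + least_j)]) []

-- ===== PORT B =====

-- B's while loop growing the square at bottom-right (i, j); fuel (i.toNat + 1) only
-- makes the recursion total: the guard k ≤ i fails before fuel can run out
def pvSideGoB (pts : List (Int × Int)) (i j : Int) : Nat → Int → Int
  | 0, k => k
  | fuel+1, k =>
    if k ≤ i ∧ k ≤ j ∧ ∀ t ∈ PySem.List.pyRange 0 (k+1),
        ((i - t, j - k) ∈ pts ∧ (i - k, j - t) ∈ pts) then
      pvSideGoB pts i j fuel (k+1)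
    else k

-- _side(pts, i, j) of Source B
def pvSideB (pts : List (Int × Int)) (i j : Int) : Int :=
  if (i, j) ∈ pts then pvSideGoB pts i j (i.toNat + 1) 1 else 0

def find_big_square_alt (list_unassigned : List (Int × Int)) : List (Int × Int) :=
  let l := PySem.List.sorted2 list_unassigned (fun x => x.1) (fun x => x.2)
  let least_i := ((PySem.List.pyGet? l 0).getD (0, 0)).1
  let least_j := ((PySem.List.pyGet? l 0).getD (0, 0)).2
  let temp := l.map (fun p => (p.1 - least_i, p.2 - least_j))
  let temp1 := PySem.List.sorted2 temp (fun x => x.1) (fun x => x.2)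
  let start_i := ((PySem.List.pyGet? temp1 0).getD (0, 0)).1
  let start_j := ((PySem.List.pyGet? temp1 0).getD (0, 0)).2
  let temp2 := PySem.List.sorted temp1 (fun a => a.2)
  let end_i := ((PySem.List.pyGet? temp2 (-1)).getD (0, 0)).1
  let end_j := ((PySem.List.pyGet? temp2 (-1)).getD (0, 0)).2
  let rows := end_i - start_i + 1
  let cols := end_j - start_j + 1
  let pts : PySem.Set (Int × Int) := PySem.Set.ofList temp2
  let m : Int × Int × Int :=
    (PySem.List.pyRange 0 rows).foldl (fun acc i =>
      (PySem.List.pyRange 0 cols).foldl (fun acc j =>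
        let k := pvSideB pts i j
        if acc.1 < k then (k, i, j) else acc) acc) (0, 0, 0)
  (PySem.List.pyRange m.2.1 (m.2.1 - m.1) (-1)).flatMap (fun a =>
    (PySem.List.pyRange m.2.2 (m.2.2 - m.1) (-1)).map (fun b =>
      (a + least_i, b + least_j)))

-- ===== PRECONDITION & SPEC =====
-- A raises IndexError (list_unassigned[0]) exactly on the empty list
def Pre_find_big_square (list_unassigned : List (Int × Int)) : Prop := list_unassigned ≠ []
instance (list_unassigned : List (Int × Int)) : Decidable (Pre_find_big_square list_unassigned) := by unfold Pre_find_big_square; infer_instance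
def pvWitness_find_big_square : (List (Int × Int)) := [(0, 0)]

def Spec_find_big_square (list_unassigned : List (Int × Int)) (out : List (Int × Int)) : Prop := out = find_big_square_alt list_unassigned
instance (list_unassigned : List (Int × Int)) (out : List (Int × Int)) : Decidable (Spec_find_big_square list_unassigned out) := by unfold Spec_find_big_square; infer_instance

-- ===== CLAIM (what is proved, stated in full; the proofs are below) =====
def Claim_equal_find_big_square : Prop := ∀ (list_unassigned : List (Int × Int)), Dom_find_big_square list_unassigned → Pre_find_big_square list_unassigned → Spec_find_big_square list_unassigned (find_big_square list_unassigned)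

-- ===== LEMMAS AND PROOFS =====

-- the reference value: side of the largest all-ones square with bottom-right (i, j)
def sideN (arr : Array (Array Int)) : Nat → Nat → Nat
  | 0, j => if pvGet2 arr 0 (j : Int) = 1 then 1 else 0
  | i+1, 0 => if pvGet2 arr ((i : Int)+1) 0 = 1 then 1 else 0
  | i+1, j+1 => if pvGet2 arr ((i : Int)+1) ((j : Int)+1) = 1 then
      min (sideN arr (i+1) j) (min (sideN arr i (j+1)) (sideN arr i j)) + 1 else 0
  termination_by i j => (i, j)

-- the k×k block with bottom-right (i, j) is all ones (and fits above/left of the origin)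
def GoodSq (arr : Array (Array Int)) (i j k : Nat) : Prop :=
  k ≤ i + 1 ∧ k ≤ j + 1 ∧ ∀ a b : Nat, a < k → b < k → pvGet2 arr ((i - a : Nat) : Int) ((j - b : Nat) : Int) = 1

lemma goodsq_mono {arr : Array (Array Int)} {i j : Nat} {k m : Nat} (h : GoodSq arr i j k) (hm : m ≤ k) : GoodSq arr i j m := by
  obtain ⟨h1, h2, h3⟩ := h
  exact ⟨le_trans hm h1, le_trans hm h2, fun a b ha hb => h3 a b (lt_of_lt_of_le ha hm) (lt_of_lt_of_le hb hm)⟩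

lemma goodsq_zero (arr : Array (Array Int)) (i j : Nat) : GoodSq arr i j 0 :=
  ⟨Nat.zero_le _, Nat.zero_le _, fun a b ha _ => absurd ha (Nat.not_lt_zero a)⟩

lemma goodsq_one (arr : Array (Array Int)) (i j : Nat) : GoodSq arr i j 1 ↔ pvGet2 arr i j = 1 := by
  constructor
  · intro ⟨_, _, h⟩
    have := h 0 0 Nat.one_pos Nat.one_pos
    simpa using this
  · intro h
    refine ⟨Nat.le_add_left 1 i, Nat.le_add_left 1 j, fun a b ha hb => ?_⟩
    interval_cases a; interval_cases b; simpa using h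

lemma goodsq_succ (arr : Array (Array Int)) (i j k : Nat) :
    GoodSq arr (i+1) (j+1) (k+1) ↔
      pvGet2 arr ((i : Int)+1) ((j : Int)+1) = 1 ∧ GoodSq arr (i+1) j k ∧ GoodSq arr i (j+1) k ∧ GoodSq arr i j k := by
  constructor
  · rintro ⟨h1, h2, h3⟩
    refine ⟨?_, ⟨by omega, by omega, fun a b ha hb => ?_⟩, ⟨by omega, by omega, fun a b ha hb => ?_⟩,
            ⟨by omega, by omega, fun a b ha hb => ?_⟩⟩
    · have := h3 0 0 (Nat.succ_pos k) (Nat.succ_pos k)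
      simpa using this
    · have := h3 a (b+1) (by omega) (by omega)
      have e1 : (i + 1 - a : Nat) = i + 1 - a := rfl
      have e2 : (j - b : Nat) = (j + 1 - (b+1) : Nat) := by omega
      rw [e2]; exact this
    · have := h3 (a+1) b (by omega) (by omega)
      have e : (i - a : Nat) = (i + 1 - (a+1) : Nat) := by omega
      rw [e]; exact this
    · have := h3 (a+1) (b+1) (by omega) (by omega)
      have e1 : (i - a : Nat) = (i + 1 - (a+1) : Nat) := by omega
      have e2 : (j - b : Nat) = (j + 1 - (b+1) : Nat) := by omega
      rw [e1, e2]; exact this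
  · rintro ⟨hc, ⟨a1, a2, a3⟩, ⟨b1, b2, b3⟩, ⟨c1, c2, c3⟩⟩
    refine ⟨by omega, by omega, fun a b ha hb => ?_⟩
    rcases Nat.eq_or_lt_of_le (Nat.lt_succ_iff.mp ha) with hak | hak
    · rcases Nat.eq_or_lt_of_le (Nat.lt_succ_iff.mp hb) with hbk | hbk
      · rcases Nat.eq_zero_or_pos k with hk0 | hk
        · have e1 : (i + 1 - a : Nat) = i + 1 := by omega
          have e2 : (j + 1 - b : Nat) = j + 1 := by omega
          rw [e1, e2]; push_cast; simpa using hc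
        · have := c3 (k-1) (k-1) (by omega) (by omega)
          have e1 : (i + 1 - a : Nat) = (i - (k-1) : Nat) := by omega
          have e2 : (j + 1 - b : Nat) = (j - (k-1) : Nat) := by omega
          rw [e1, e2]; exact this
      · have hk : 1 ≤ k := by omega
        have := b3 (k-1) b (by omega) hbk
        have e1 : (i + 1 - a : Nat) = (i - (k-1) : Nat) := by omega
        rw [e1]; exact this
    · rcases Nat.eq_or_lt_of_le (Nat.lt_succ_iff.mp hb) with hbk | hbk
      · have := a3 a (k-1) hak (by omega)
        have e2 : (j + 1 - b : Nat) = (j - (k-1) : Nat) := by omega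
        rw [e2]; exact this
      · rcases Nat.eq_zero_or_pos a with rfl | hA
        · rcases Nat.eq_zero_or_pos b with rfl | hB
          · have e1 : (i + 1 - 0 : Nat) = i + 1 := by omega
            have e2 : (j + 1 - 0 : Nat) = j + 1 := by omega
            rw [e1, e2]; push_cast; simpa using hc
          · have := a3 0 (b-1) hak (by omega)
            have e2 : (j + 1 - b : Nat) = (j - (b-1) : Nat) := by omega
            rw [e2]; exact this
        · rcases Nat.eq_zero_or_pos b with rfl | hB
          · have := b3 (a-1) 0 (by omega) hbk
            have e1 : (i + 1 - a : Nat) = (i - (a-1) : Nat) := by omega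
            rw [e1]; exact this
          · have := c3 (a-1) (b-1) (by omega) (by omega)
            have e1 : (i + 1 - a : Nat) = (i - (a-1) : Nat) := by omega
            have e2 : (j + 1 - b : Nat) = (j - (b-1) : Nat) := by omega
            rw [e1, e2]; exact this

lemma sideN_goodsq (arr : Array (Array Int)) (i j : Nat) :
    GoodSq arr i j (sideN arr i j) ∧ ¬ GoodSq arr i j (sideN arr i j + 1) := by
  induction i generalizing j with
  | zero =>
    rw [sideN]
    split
    · rename_i hc
      refine ⟨(goodsq_one arr 0 j).mpr (by simpa using hc), ?_⟩
      rintro ⟨h1, -, -⟩; omega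
    · rename_i hc
      exact ⟨goodsq_zero arr 0 j, fun h => hc (by simpa using (goodsq_one arr 0 j).mp h)⟩
  | succ i ih =>
    induction j with
    | zero =>
      rw [sideN]
      split
      · rename_i hc
        refine ⟨(goodsq_one arr (i+1) 0).mpr (by push_cast; simpa using hc), ?_⟩
        rintro ⟨-, h2, -⟩; omega
      · rename_i hc
        refine ⟨goodsq_zero arr (i+1) 0, fun h => hc ?_⟩
        have := (goodsq_one arr (i+1) 0).mp h
        push_cast at this; simpa using this
    | succ j ihj =>
      rw [sideN]
      split
      · rename_i hc
        set x := sideN arr (i+1) j with hx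
        set y := sideN arr i (j+1) with hy
        set z := sideN arr i j with hz
        set m := min x (min y z) with hm
        constructor
        · rw [goodsq_succ]
          exact ⟨hc, goodsq_mono ihj.1 (by omega), goodsq_mono (ih (j+1)).1 (by omega),
                 goodsq_mono (ih j).1 (by omega)⟩
        · intro h
          rw [show m + 1 + 1 = (m+1) + 1 by rfl, goodsq_succ] at h
          obtain ⟨-, hX, hY, hZ⟩ := h
          have : m = x ∨ m = y ∨ m = z := by omega
          rcases this with e | e | e
          · apply ihj.2; rw [← e]; exact hX
          · apply (ih (j+1)).2; rw [← hy, ← e]; exact hY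
          · apply (ih j).2; rw [← hz, ← e]; exact hZ
      · rename_i hc
        refine ⟨goodsq_zero arr (i+1) (j+1), fun h => hc ?_⟩
        have := (goodsq_one arr (i+1) (j+1)).mp h
        push_cast at this; simpa using this

lemma cond_iff_goodsq (arr : Array (Array Int)) (i j k : Nat) (hk : GoodSq arr i j k) :
    ((0:Int) ≤ (i:Int) - (k:Int) ∧ (0:Int) ≤ (j:Int) - (k:Int)
      ∧ (∀ t ∈ PySem.List.pyRange 0 ((k:Int)+1), pvGet2 arr ((i:Int) - t) ((j:Int) - (k:Int)) = 1)
      ∧ (∀ t ∈ PySem.List.pyRange 0 ((k:Int)+1), pvGet2 arr ((i:Int) - (k:Int)) ((j:Int) - t) = 1))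
    ↔ GoodSq arr i j (k+1) := by
  have hmem : ∀ t : Int, t ∈ PySem.List.pyRange 0 ((k:Int)+1) ↔ 0 ≤ t ∧ t < (k:Int)+1 := by
    intro t; simpa using PySem.List.mem_pyRange_one (a := 0) (b := (k:Int)+1) (x := t)
  constructor
  · rintro ⟨h1, h2, h3, h4⟩
    have hik : k ≤ i := by omega
    have hjk : k ≤ j := by omega
    refine ⟨by omega, by omega, fun a b ha hb => ?_⟩
    have ha' : a ≤ k := by omega
    have hb' : b ≤ k := by omega
    rcases Nat.eq_or_lt_of_le hb' with hbk | hbk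
    · have := h3 (a : Int) ((hmem _).mpr (by constructor <;> omega))
      have e1 : ((i - a : Nat) : Int) = (i:Int) - (a:Int) := by omega
      have e2 : ((j - b : Nat) : Int) = (j:Int) - (k:Int) := by omega
      rw [e1, e2]; exact this
    · rcases Nat.eq_or_lt_of_le ha' with hak | hak
      · have := h4 (b : Int) ((hmem _).mpr (by constructor <;> omega))
        have e1 : ((i - a : Nat) : Int) = (i:Int) - (k:Int) := by omega
        have e2 : ((j - b : Nat) : Int) = (j:Int) - (b:Int) := by omega
        rw [e1, e2]; exact this
      · exact hk.2.2 a b hak hbk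
  · rintro ⟨h1, h2, h3⟩
    have hik : k ≤ i := by omega
    have hjk : k ≤ j := by omega
    refine ⟨by omega, by omega, fun t ht => ?_, fun t ht => ?_⟩
    · rw [hmem] at ht
      have := h3 t.toNat k (by omega) (by omega)
      have e1 : ((i - t.toNat : Nat) : Int) = (i:Int) - t := by omega
      have e2 : ((j - k : Nat) : Int) = (j:Int) - (k:Int) := by omega
      rw [e1, e2] at this; exact this
    · rw [hmem] at ht
      have := h3 k t.toNat (by omega) (by omega)
      have e1 : ((i - k : Nat) : Int) = (i:Int) - (k:Int) := by omega
      have e2 : ((j - t.toNat : Nat) : Int) = (j:Int) - t := by omega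
      rw [e1, e2] at this; exact this

-- the grid reads as an indicator of membership, on in-range indices
def MemGrid (pts : List (Int × Int)) (arr : Array (Array Int)) (rowsN colsN : Nat) : Prop :=
  ∀ a b : Nat, a < rowsN → b < colsN →
    pvGet2 arr (a : Int) (b : Int) = (if ((a : Int), (b : Int)) ∈ pts then 1 else 0)

lemma memgrid_iff {pts : List (Int × Int)} {arr : Array (Array Int)} {rowsN colsN : Nat}
    (hg : MemGrid pts arr rowsN colsN) (a b : Nat) (ha : a < rowsN) (hb : b < colsN) :
    (pvGet2 arr (a : Int) (b : Int) = 1 ↔ ((a : Int), (b : Int)) ∈ pts) := by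
  rw [hg a b ha hb]
  split
  · rename_i h; simp [h]
  · rename_i h; simp [h]

-- B's while-guard is the same test as A's square condition, through the grid
lemma condB_iff_cond (pts : List (Int × Int)) (arr : Array (Array Int)) (rowsN colsN : Nat)
    (hg : MemGrid pts arr rowsN colsN) (i j k : Nat) (hi : i < rowsN) (hj : j < colsN) :
    (((k:Int) ≤ (i:Int) ∧ (k:Int) ≤ (j:Int)
        ∧ ∀ t ∈ PySem.List.pyRange 0 ((k:Int)+1),
            (((i:Int) - t, (j:Int) - (k:Int)) ∈ pts ∧ ((i:Int) - (k:Int), (j:Int) - t) ∈ pts))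
      ↔ ((0:Int) ≤ (i:Int) - (k:Int) ∧ (0:Int) ≤ (j:Int) - (k:Int)
        ∧ (∀ t ∈ PySem.List.pyRange 0 ((k:Int)+1), pvGet2 arr ((i:Int) - t) ((j:Int) - (k:Int)) = 1)
        ∧ (∀ t ∈ PySem.List.pyRange 0 ((k:Int)+1), pvGet2 arr ((i:Int) - (k:Int)) ((j:Int) - t) = 1))) := by
  have hmem : ∀ t : Int, t ∈ PySem.List.pyRange 0 ((k:Int)+1) ↔ 0 ≤ t ∧ t < (k:Int)+1 := by
    intro t; simpa using PySem.List.mem_pyRange_one (a := 0) (b := (k:Int)+1) (x := t)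
  have key : ∀ (hik : k ≤ i) (hjk : k ≤ j) (t : Int), 0 ≤ t → t ≤ (k:Int) →
      (pvGet2 arr ((i:Int) - t) ((j:Int) - (k:Int)) = 1 ↔ ((i:Int) - t, (j:Int) - (k:Int)) ∈ pts)
      ∧ (pvGet2 arr ((i:Int) - (k:Int)) ((j:Int) - t) = 1 ↔ ((i:Int) - (k:Int), (j:Int) - t) ∈ pts) := by
    intro hik hjk t h0 hk'
    constructor
    · have e1 : (i:Int) - t = ((i - t.toNat : Nat) : Int) := by omega
      have e2 : (j:Int) - (k:Int) = ((j - k : Nat) : Int) := by omega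
      rw [e1, e2]
      exact memgrid_iff hg _ _ (by omega) (by omega)
    · have e1 : (i:Int) - (k:Int) = ((i - k : Nat) : Int) := by omega
      have e2 : (j:Int) - t = ((j - t.toNat : Nat) : Int) := by omega
      rw [e1, e2]
      exact memgrid_iff hg _ _ (by omega) (by omega)
  constructor
  · rintro ⟨h1, h2, h3⟩
    have hik : k ≤ i := by omega
    have hjk : k ≤ j := by omega
    refine ⟨by omega, by omega, fun t ht => ?_, fun t ht => ?_⟩
    · rw [hmem] at ht
      exact ((key hik hjk t ht.1 (by omega)).1).mpr (h3 t ((hmem t).mpr ht)).1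
    · rw [hmem] at ht
      exact ((key hik hjk t ht.1 (by omega)).2).mpr (h3 t ((hmem t).mpr ht)).2
  · rintro ⟨h1, h2, h3, h4⟩
    have hik : k ≤ i := by omega
    have hjk : k ≤ j := by omega
    refine ⟨by omega, by omega, fun t ht => ?_⟩
    rw [hmem] at ht
    exact ⟨((key hik hjk t ht.1 (by omega)).1).mp (h3 t ((hmem t).mpr ht)),
           ((key hik hjk t ht.1 (by omega)).2).mp (h4 t ((hmem t).mpr ht))⟩

lemma sideGoB_spec (pts : List (Int × Int)) (arr : Array (Array Int)) (rowsN colsN : Nat)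
    (hg : MemGrid pts arr rowsN colsN) (i j : Nat) (hi : i < rowsN) (hj : j < colsN) :
    ∀ (fuel k : Nat), k ≤ sideN arr i j → sideN arr i j ≤ k + fuel →
      pvSideGoB pts (i:Int) (j:Int) fuel (k : Int) = (sideN arr i j : Int) := by
  intro fuel
  induction fuel with
  | zero => intro k h1 h2; have : k = sideN arr i j := by omega
            rw [pvSideGoB, this]
  | succ fuel ihf =>
    intro k h1 h2
    have hgk : GoodSq arr i j k := goodsq_mono (sideN_goodsq arr i j).1 h1
    rw [pvSideGoB]
    rcases Nat.eq_or_lt_of_le h1 with heq | hlt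
    · by_cases hB : ((k:Int) ≤ (i:Int) ∧ (k:Int) ≤ (j:Int)
          ∧ ∀ t ∈ PySem.List.pyRange 0 ((k:Int)+1),
              (((i:Int) - t, (j:Int) - (k:Int)) ∈ pts ∧ ((i:Int) - (k:Int), (j:Int) - t) ∈ pts))
      · exfalso
        have hgood := (cond_iff_goodsq arr i j k hgk).mp
          ((condB_iff_cond pts arr rowsN colsN hg i j k hi hj).mp hB)
        exact (sideN_goodsq arr i j).2 (heq ▸ hgood)
      · rw [if_neg hB, heq]
    · have hcond := (condB_iff_cond pts arr rowsN colsN hg i j k hi hj).mpr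
        ((cond_iff_goodsq arr i j k hgk).mpr (goodsq_mono (sideN_goodsq arr i j).1 (by omega)))
      rw [if_pos hcond]
      have : ((k:Int) + 1) = ((k+1 : Nat) : Int) := by push_cast; ring
      rw [this]
      exact ihf (k+1) (by omega) (by omega)

lemma pvSideB_eq (pts : List (Int × Int)) (arr : Array (Array Int)) (rowsN colsN : Nat)
    (hg : MemGrid pts arr rowsN colsN) (i j : Nat) (hi : i < rowsN) (hj : j < colsN) :
    pvSideB pts (i : Int) (j : Int) = ((sideN arr i j : Nat) : Int) := by
  by_cases hc : ((i:Int), (j:Int)) ∈ pts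
  · have hc' : pvGet2 arr (i:Int) (j:Int) = 1 := (memgrid_iff hg i j hi hj).mpr hc
    have h1 : 1 ≤ sideN arr i j := by
      by_contra h
      have hz : sideN arr i j = 0 := by omega
      exact (sideN_goodsq arr i j).2 (by rw [hz]; exact (goodsq_one arr i j).mpr hc')
    have hle : sideN arr i j ≤ i + 1 := (sideN_goodsq arr i j).1.1
    have h := sideGoB_spec pts arr rowsN colsN hg i j hi hj (i + 1) 1 h1 (by omega)
    simpa [pvSideB, hc] using h
  · have hz : sideN arr i j = 0 := by
      by_contra h
      have := (goodsq_one arr i j).mp (goodsq_mono (sideN_goodsq arr i j).1 (by omega))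
      exact hc ((memgrid_iff hg i j hi hj).mp this)
    simp [pvSideB, hc, hz]

lemma pvGet2_nat (S : Array (Array Int)) (a b : Nat) :
    pvGet2 S (a : Int) (b : Int) = ((S[a]?).getD #[])[b]?.getD 0 := by
  simp [pvGet2]

lemma size_pvSet2_nat (S : Array (Array Int)) (a b : Nat) (v : Int) :
    (pvSet2 S (a:Int) (b:Int) v).size = S.size := by
  simp [pvSet2]

lemma row_pvSet2_nat (S : Array (Array Int)) (a b : Nat) (v : Int) (a' : Nat) :
    ((pvSet2 S (a:Int) (b:Int) v)[a']?.getD #[]) =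
      if a' = a ∧ a < S.size then ((S[a]?).getD #[]).setIfInBounds b v else (S[a']?).getD #[] := by
  simp only [pvSet2, Int.toNat_natCast, Array.getElem?_modify]
  by_cases h : a' = a ∧ a < S.size
  · obtain ⟨rfl, hlt⟩ := h
    rw [if_pos rfl, if_pos ⟨rfl, hlt⟩]
    rw [Array.getElem?_eq_getElem hlt]
    simp
  · rw [if_neg h]
    by_cases he : a = a'
    · subst he
      have hge : S.size ≤ a := by omega
      rw [if_pos rfl, Array.getElem?_eq_none (by omega)]
      simp
    · rw [if_neg he]

lemma rowsize_pvSet2_nat (S : Array (Array Int)) (a b : Nat) (v : Int) (a' : Nat) :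
    ((pvSet2 S (a:Int) (b:Int) v)[a']?.getD #[]).size = ((S[a']?).getD #[]).size := by
  rw [row_pvSet2_nat]
  by_cases h : a' = a ∧ a < S.size
  · rw [if_pos h, Array.size_setIfInBounds, h.1]
  · rw [if_neg h]

lemma get2_pvSet2_same (S : Array (Array Int)) (a b : Nat) (v : Int)
    (ha : a < S.size) (hb : b < ((S[a]?).getD #[]).size) :
    pvGet2 (pvSet2 S (a:Int) (b:Int) v) (a:Int) (b:Int) = v := by
  rw [pvGet2_nat, row_pvSet2_nat, if_pos ⟨rfl, ha⟩]
  simp [Array.getElem?_setIfInBounds, hb]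

lemma get2_pvSet2_ne (S : Array (Array Int)) (a b a' b' : Nat) (v : Int)
    (h : ¬(a' = a ∧ b' = b)) :
    pvGet2 (pvSet2 S (a:Int) (b:Int) v) (a':Int) (b':Int) = pvGet2 S (a':Int) (b':Int) := by
  rw [pvGet2_nat, pvGet2_nat, row_pvSet2_nat]
  by_cases he : a' = a ∧ a < S.size
  · rw [if_pos he]
    obtain ⟨rfl, -⟩ := he
    have hbb : b ≠ b' := fun hb => h ⟨rfl, hb.symm⟩
    simp [Array.getElem?_setIfInBounds, hbb]
  · rw [if_neg he]

lemma grid_row (n : Nat) (C : Int) (f : Int → Int → Int) (a : Nat) (ha : a < n) :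
    ((((PySem.List.pyRange 0 (n:Int)).map (fun i => ((PySem.List.pyRange 0 C).map (f i)).toArray)).toArray)[a]?.getD #[]) =
      ((PySem.List.pyRange 0 C).map (f (a:Int))).toArray := by
  rw [List.getElem?_toArray, PySem.List.getElem?_map_pyRange_zero _ n a ha]
  rfl

lemma grid_entry (C0 : Nat) (g : Int → Int) (b : Nat) (hb : b < C0) :
    ((((PySem.List.pyRange 0 (C0:Int)).map g).toArray)[b]?.getD 0) = g (b:Int) := by
  rw [List.getElem?_toArray, PySem.List.getElem?_map_pyRange_zero _ C0 b hb]
  rfl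

def InvRow (arr : Array (Array Int)) (C0 : Nat) (S : Array (Array Int)) (i jm : Nat) : Prop :=
  ∀ a b : Nat, a < arr.size → b < C0 →
    pvGet2 S (a:Int) (b:Int) =
      if a < i ∨ b = 0 ∨ (a = i ∧ b < jm) then ((sideN arr a b : Nat) : Int) else 0

lemma sideN_edge (arr : Array (Array Int))
    (H01 : ∀ i j : Int, pvGet2 arr i j = 0 ∨ pvGet2 arr i j = 1)
    (a b : Nat) (h : a = 0 ∨ b = 0) :
    ((sideN arr a b : Nat) : Int) = pvGet2 arr (a:Int) (b:Int) := by
  rcases h with rfl | rfl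
  · rw [sideN]
    rcases H01 0 (b:Int) with h' | h' <;> simp [h']
  · cases a with
    | zero =>
      rw [sideN]
      rcases H01 0 0 with h' | h' <;> simp [h']
    | succ i =>
      rw [sideN]
      push_cast
      rcases H01 ((i:Int)+1) 0 with h' | h' <;> simp [h']

lemma dp_step (arr : Array (Array Int)) (C0 : Nat) (S : Array (Array Int)) (i j : Nat)
    (hi1 : 1 ≤ i) (hin : i < arr.size) (hj1 : 1 ≤ j) (hjC : j < C0)
    (hlen : S.size = arr.size)
    (hrow : ∀ a, a < arr.size → ((S[a]?).getD #[]).size = C0)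
    (hinv : InvRow arr C0 S i j) :
    (pvDPstep arr S (i:Int) (j:Int)).size = arr.size ∧
    (∀ a, a < arr.size → ((pvDPstep arr S (i:Int) (j:Int))[a]?.getD #[]).size = C0) ∧
    InvRow arr C0 (pvDPstep arr S (i:Int) (j:Int)) i (j+1) := by
  have hstep : pvDPstep arr S (i:Int) (j:Int) =
      pvSet2 S (i:Int) (j:Int)
        (if pvGet2 arr (i:Int) (j:Int) = 1 then
          min (pvGet2 S (i:Int) ((j:Int)-1)) (min (pvGet2 S ((i:Int)-1) (j:Int)) (pvGet2 S ((i:Int)-1) ((j:Int)-1))) + 1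
        else 0) := by
    by_cases hc : pvGet2 arr (i:Int) (j:Int) = 1 <;> simp [pvDPstep, hc]
  obtain ⟨i', rfl⟩ : ∃ i', i = i' + 1 := ⟨i - 1, by omega⟩
  obtain ⟨j', rfl⟩ : ∃ j', j = j' + 1 := ⟨j - 1, by omega⟩
  have ei : ((i'+1 : Nat) : Int) - 1 = ((i' : Nat) : Int) := by push_cast; ring
  have ej : ((j'+1 : Nat) : Int) - 1 = ((j' : Nat) : Int) := by push_cast; ring
  have hx : pvGet2 S ((i'+1 : Nat) : Int) (((j'+1:Nat):Int) - 1) = ((sideN arr (i'+1) j' : Nat) : Int) := by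
    rw [ej, hinv (i'+1) j' hin (by omega)]
    rw [if_pos (by omega)]
  have hy : pvGet2 S (((i'+1:Nat):Int) - 1) ((j'+1 : Nat) : Int) = ((sideN arr i' (j'+1) : Nat) : Int) := by
    rw [ei, hinv i' (j'+1) (by omega) hjC]
    rw [if_pos (by omega)]
  have hz : pvGet2 S (((i'+1:Nat):Int) - 1) (((j'+1:Nat):Int) - 1) = ((sideN arr i' j' : Nat) : Int) := by
    rw [ei, ej, hinv i' j' (by omega) (by omega)]
    rw [if_pos (by omega)]
  have hval : (if pvGet2 arr ((i'+1:Nat):Int) ((j'+1:Nat):Int) = 1 then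
      min (pvGet2 S ((i'+1:Nat):Int) (((j'+1:Nat):Int)-1)) (min (pvGet2 S (((i'+1:Nat):Int)-1) ((j'+1:Nat):Int)) (pvGet2 S (((i'+1:Nat):Int)-1) (((j'+1:Nat):Int)-1))) + 1
    else 0) = ((sideN arr (i'+1) (j'+1) : Nat) : Int) := by
    rw [hx, hy, hz]
    rw [sideN]
    have ec : ((i'+1 : Nat) : Int) = (i' : Int) + 1 := by push_cast; ring
    have ec2 : ((j'+1 : Nat) : Int) = (j' : Int) + 1 := by push_cast; ring
    rw [ec, ec2]
    split
    · push_cast; rfl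
    · rfl
  refine ⟨?_, ?_, ?_⟩
  · rw [hstep, size_pvSet2_nat, hlen]
  · intro a ha
    rw [hstep, rowsize_pvSet2_nat]
    exact hrow a ha
  · intro a b ha hb
    rw [hstep]
    by_cases hab : a = i'+1 ∧ b = j'+1
    · obtain ⟨rfl, rfl⟩ := hab
      rw [get2_pvSet2_same S _ _ _ (by omega) (by rw [hrow _ hin]; omega)]
      rw [hval, if_pos (by omega)]
    · rw [get2_pvSet2_ne S _ _ _ _ _ hab]
      rw [hinv a b ha hb]
      have : (a < i'+1 ∨ b = 0 ∨ (a = i'+1 ∧ b < j'+1+1)) ↔ (a < i'+1 ∨ b = 0 ∨ (a = i'+1 ∧ b < j'+1)) := by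
        constructor <;> intro h <;> omega
      rw [if_congr this rfl rfl]

def S0m (arr : Array (Array Int)) (C0 : Nat) : Array (Array Int) :=
  ((PySem.List.pyRange 0 (arr.size : Int)).map (fun i =>
    ((PySem.List.pyRange 0 (C0 : Int)).map (fun j => if i = 0 ∨ j = 0 then pvGet2 arr i j else 0)).toArray)).toArray

lemma S0m_len (arr : Array (Array Int)) (C0 : Nat) : (S0m arr C0).size = arr.size := by
  simp [S0m, PySem.List.length_pyRange_one]

lemma S0m_rowlen (arr : Array (Array Int)) (C0 : Nat) (a : Nat) (ha : a < arr.size) :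
    ((S0m arr C0)[a]?.getD #[]).size = C0 := by
  rw [S0m, grid_row _ _ _ a ha]
  simp [PySem.List.length_pyRange_one]

lemma S0m_inv (arr : Array (Array Int)) (C0 : Nat)
    (H01 : ∀ i j : Int, pvGet2 arr i j = 0 ∨ pvGet2 arr i j = 1) :
    InvRow arr C0 (S0m arr C0) 1 1 := by
  intro a b ha hb
  rw [pvGet2_nat, S0m, grid_row _ _ _ a ha, grid_entry _ _ b hb]
  have hcond : ((a:Int) = 0 ∨ (b:Int) = 0) ↔ (a = 0 ∨ b = 0) := by
    constructor <;> intro h <;> omega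
  rw [if_congr hcond rfl rfl]
  have hcond2 : (a < 1 ∨ b = 0 ∨ (a = 1 ∧ b < 1)) ↔ (a = 0 ∨ b = 0) := by
    constructor <;> intro h <;> omega
  rw [if_congr hcond2 rfl rfl]
  split
  · rename_i h
    exact (sideN_edge arr H01 a b h).symm
  · rfl

lemma dp_inner (arr : Array (Array Int)) (C0 : Nat) (i : Nat)
    (hi1 : 1 ≤ i) (hin : i < arr.size) :
    ∀ (jm : Nat), 1 ≤ jm → jm ≤ C0 →
    ∀ (S : Array (Array Int)), S.size = arr.size →
      (∀ a, a < arr.size → ((S[a]?).getD #[]).size = C0) →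
      InvRow arr C0 S i 1 →
      (((PySem.List.pyRange 1 (jm:Int)).foldl (fun S j => pvDPstep arr S (i:Int) j) S).size = arr.size) ∧
      (∀ a, a < arr.size → (((PySem.List.pyRange 1 (jm:Int)).foldl (fun S j => pvDPstep arr S (i:Int) j) S)[a]?.getD #[]).size = C0) ∧
      InvRow arr C0 ((PySem.List.pyRange 1 (jm:Int)).foldl (fun S j => pvDPstep arr S (i:Int) j) S) i jm := by
  intro jm hjm1
  induction jm, hjm1 using Nat.le_induction with
  | base =>
    intro _ S hlen hrow hinv
    rw [show ((1:Nat):Int) = 1 by rfl, PySem.List.pyRange_one_eq_nil (by omega)]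
    exact ⟨hlen, hrow, hinv⟩
  | succ jm hjm ih =>
    intro hjC S hlen hrow hinv
    have hsplit : PySem.List.pyRange 1 ((jm+1 : Nat) : Int) =
        PySem.List.pyRange 1 (jm:Int) ++ [(jm:Int)] := by
      have : ((jm+1 : Nat) : Int) = (jm:Int) + 1 := by push_cast; ring
      rw [this, PySem.List.pyRange_one_succ_right (by omega)]
    rw [hsplit, List.foldl_append]
    obtain ⟨h1, h2, h3⟩ := ih (by omega) S hlen hrow hinv
    simp only [List.foldl_cons, List.foldl_nil]
    exact dp_step arr C0 _ i jm hi1 hin hjm (by omega) h1 h2 h3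

lemma dp_outer (arr : Array (Array Int)) (C0 : Nat)
    (H01 : ∀ i j : Int, pvGet2 arr i j = 0 ∨ pvGet2 arr i j = 1) :
    ∀ (im : Nat), 1 ≤ im → im ≤ arr.size →
      (((PySem.List.pyRange 1 (im:Int)).foldl (fun S i =>
          (PySem.List.pyRange 1 (C0:Int)).foldl (fun S j => pvDPstep arr S i j) S) (S0m arr C0)).size = arr.size) ∧
      (∀ a, a < arr.size → (((PySem.List.pyRange 1 (im:Int)).foldl (fun S i =>
          (PySem.List.pyRange 1 (C0:Int)).foldl (fun S j => pvDPstep arr S i j) S) (S0m arr C0))[a]?.getD #[]).size = C0) ∧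
      InvRow arr C0 ((PySem.List.pyRange 1 (im:Int)).foldl (fun S i =>
          (PySem.List.pyRange 1 (C0:Int)).foldl (fun S j => pvDPstep arr S i j) S) (S0m arr C0)) im 1 := by
  intro im him1
  induction im, him1 using Nat.le_induction with
  | base =>
    intro _
    rw [show PySem.List.pyRange 1 ((1:Nat):Int) = [] from PySem.List.pyRange_one_eq_nil (by norm_num)]
    exact ⟨S0m_len arr C0, fun a ha => S0m_rowlen arr C0 a ha, S0m_inv arr C0 H01⟩
  | succ im him ih =>
    intro hiN
    have hsplit : PySem.List.pyRange 1 ((im+1 : Nat) : Int) =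
        PySem.List.pyRange 1 (im:Int) ++ [(im:Int)] := by
      have : ((im+1 : Nat) : Int) = (im:Int) + 1 := by push_cast; ring
      rw [this, PySem.List.pyRange_one_succ_right (by omega)]
    rw [hsplit, List.foldl_append]
    obtain ⟨h1, h2, h3⟩ := ih (by omega)
    simp only [List.foldl_cons, List.foldl_nil]
    by_cases hC : 1 ≤ C0
    · obtain ⟨g1, g2, g3⟩ := dp_inner arr C0 im him (by omega) C0 hC le_rfl _ h1 h2 h3
      refine ⟨g1, g2, ?_⟩
      intro a b ha hb
      rw [g3 a b ha hb]
      have : (a < im ∨ b = 0 ∨ (a = im ∧ b < C0)) ↔ (a < im+1 ∨ b = 0 ∨ (a = im+1 ∧ b < 1)) := by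
        constructor <;> intro h <;> omega
      rw [if_congr this rfl rfl]
    · have hC0 : C0 = 0 := by omega
      subst hC0
      have hnil : PySem.List.pyRange 1 ((0:Nat):Int) = [] := PySem.List.pyRange_one_eq_nil (by norm_num)
      simp only [hnil, List.foldl_nil] at h1 h2 h3 ⊢
      exact ⟨h1, h2, fun a b ha hb => by omega⟩

lemma dp_values (arr : Array (Array Int)) (C0 : Nat)
    (H01 : ∀ i j : Int, pvGet2 arr i j = 0 ∨ pvGet2 arr i j = 1)
    (a b : Nat) (ha : a < arr.size) (hb : b < C0) :
    pvGet2 ((PySem.List.pyRange 1 (arr.size:Int)).foldl (fun S i =>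
        (PySem.List.pyRange 1 (C0:Int)).foldl (fun S j => pvDPstep arr S i j) S) (S0m arr C0)) (a:Int) (b:Int)
      = ((sideN arr a b : Nat) : Int) := by
  by_cases hn : 1 ≤ arr.size
  · obtain ⟨-, -, h3⟩ := dp_outer arr C0 H01 arr.size hn le_rfl
    rw [h3 a b ha hb]
    rw [if_pos (by omega)]
  · omega

lemma scan_eq (R C : Int) (f g : Int → Int → Int)
    (hfg : ∀ i j, 0 ≤ i → i < R → 0 ≤ j → j < C → f i j = g i j)
    (hf00 : 0 ≤ f 0 0)
    (hdeg : R ≤ 0 ∨ C ≤ 0 → f 0 0 = 0) :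
    (PySem.List.pyRange 0 R).foldl (fun acc i =>
      (PySem.List.pyRange 0 C).foldl (fun acc j =>
        if acc.1 < f i j then (f i j, i, j) else acc) acc) ((f 0 0, 0, 0) : Int × Int × Int)
    = (PySem.List.pyRange 0 R).foldl (fun acc i =>
      (PySem.List.pyRange 0 C).foldl (fun acc j =>
        if acc.1 < g i j then (g i j, i, j) else acc) acc) ((0, 0, 0) : Int × Int × Int) := by
  have hinner : ∀ (i : Int), 0 ≤ i → i < R → ∀ (acc : Int × Int × Int) (l : List Int),
      (∀ j ∈ l, 0 ≤ j ∧ j < C) →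
      l.foldl (fun acc j => if acc.1 < f i j then (f i j, i, j) else acc) acc
        = l.foldl (fun acc j => if acc.1 < g i j then (g i j, i, j) else acc) acc := by
    intro i h0 hR acc l hl
    apply PySem.List.foldl_congr_mem
    intro acc' j hj
    rw [hfg i j h0 hR (hl j hj).1 (hl j hj).2]
  by_cases hR : R ≤ 0
  · rw [PySem.List.pyRange_one_eq_nil hR]
    simp only [List.foldl_nil]
    rw [hdeg (Or.inl hR)]
  by_cases hC : C ≤ 0
  · rw [PySem.List.pyRange_one_eq_nil hC]
    simp only [List.foldl_nil, List.foldl_fixed]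
    rw [hdeg (Or.inr hC)]
  rw [not_le] at hR hC
  have e1 : (if ((f 0 0, (0:Int), (0:Int)) : Int × Int × Int).1 < f 0 0 then (f 0 0, (0:Int), (0:Int)) else (f 0 0, 0, 0)) = (f 0 0, 0, 0) := by
    rw [if_neg (lt_irrefl _)]
  have e2 : (if (((0:Int), (0:Int), (0:Int)) : Int × Int × Int).1 < g 0 0 then (g 0 0, (0:Int), (0:Int)) else (0, 0, 0)) = (f 0 0, 0, 0) := by
    rw [show g 0 0 = f 0 0 from (hfg 0 0 le_rfl hR le_rfl hC).symm]
    rcases lt_or_eq_of_le hf00 with h | h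
    · rw [if_pos h]
    · rw [if_neg (by omega), ← h]
  have hfirst : (PySem.List.pyRange 0 C).foldl (fun acc j => if acc.1 < f 0 j then (f 0 j, (0:Int), j) else acc) ((f 0 0, 0, 0) : Int × Int × Int)
      = (PySem.List.pyRange 0 C).foldl (fun acc j => if acc.1 < g 0 j then (g 0 j, (0:Int), j) else acc) ((0, 0, 0) : Int × Int × Int) := by
    rw [PySem.List.pyRange_one_cons hC]
    simp only [List.foldl_cons]
    rw [e1, e2]
    exact hinner 0 le_rfl hR _ _ (fun j hj => by
      rw [PySem.List.mem_pyRange_one] at hj; exact ⟨by omega, hj.2⟩)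
  rw [PySem.List.pyRange_one_cons hR]
  simp only [List.foldl_cons]
  rw [hfirst]
  apply PySem.List.foldl_congr_mem
  intro acc i hi
  rw [PySem.List.mem_pyRange_one] at hi
  rw [hinner i (by omega) hi.2 acc _ (fun j hj => by
    rw [PySem.List.mem_pyRange_one] at hj; exact ⟨hj.1, hj.2⟩)]

lemma grid_H01 (rows cols : Int) (temp2 : List (Int × Int)) :
    ∀ i j : Int, pvGet2 (pvGrid rows cols temp2) i j = 0 ∨ pvGet2 (pvGrid rows cols temp2) i j = 1 := by
  intro i j
  rw [pvGet2, pvGrid]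
  cases hrow : (((PySem.List.pyRange 0 rows).map (fun i =>
      ((PySem.List.pyRange 0 cols).map (fun j => if (i, j) ∈ temp2 then (1:Int) else 0)).toArray)).toArray)[i.toNat]? with
  | none => left; simp
  | some r =>
    rw [List.getElem?_toArray] at hrow
    have hr := List.mem_of_getElem? hrow
    obtain ⟨x, -, rfl⟩ := List.mem_map.mp hr
    simp only [Option.getD_some]
    cases hv : (((PySem.List.pyRange 0 cols).map (fun j => if (x, j) ∈ temp2 then (1:Int) else 0)).toArray)[j.toNat]? with
    | none => left; rfl
    | some v =>
      rw [List.getElem?_toArray] at hv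
      have hvm := List.mem_of_getElem? hv
      obtain ⟨y, -, hy⟩ := List.mem_map.mp hvm
      simp only [Option.getD_some]
      by_cases hmem : (x, y) ∈ temp2
      · right; rw [← hy, if_pos hmem]
      · left; rw [← hy, if_neg hmem]

lemma S1_00_deg (arr : Array (Array Int)) (C0 : Nat) (h : arr.size = 0 ∨ C0 = 0) :
    pvGet2 ((PySem.List.pyRange 1 (arr.size:Int)).foldl (fun S i =>
      (PySem.List.pyRange 1 (C0:Int)).foldl (fun S j => pvDPstep arr S i j) S) (S0m arr C0)) 0 0 = 0 := by
  rcases h with h | h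
  · rw [show PySem.List.pyRange 1 (arr.size:Int) = [] from PySem.List.pyRange_one_eq_nil (by omega)]
    simp only [List.foldl_nil]
    have hS : S0m arr C0 = #[] := by
      rw [S0m, show PySem.List.pyRange 0 (arr.size:Int) = [] from PySem.List.pyRange_one_eq_nil (by omega)]
      rfl
    rw [hS]
    decide
  · subst h
    have hnil : PySem.List.pyRange 1 (((0:Nat)):Int) = [] := PySem.List.pyRange_one_eq_nil (by norm_num)
    simp only [hnil, List.foldl_nil, List.foldl_fixed]
    rw [pvGet2, S0m]
    cases hrow : (((PySem.List.pyRange 0 (arr.size:Int)).map (fun i =>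
        ((PySem.List.pyRange 0 (((0:Nat)):Int)).map
          (fun j => if i = 0 ∨ j = 0 then pvGet2 arr i j else 0)).toArray)).toArray)[(0:Int).toNat]? with
    | none => simp
    | some r =>
      rw [List.getElem?_toArray] at hrow
      have hr := List.mem_of_getElem? hrow
      obtain ⟨x, -, rfl⟩ := List.mem_map.mp hr
      rw [show PySem.List.pyRange 0 (((0:Nat)):Int) = [] from PySem.List.pyRange_one_eq_nil (by norm_num)]
      simp

-- MemGrid for A's grid, in the nondegenerate case
lemma grid_memgrid (rows cols : Int) (temp2 : List (Int × Int)) (hr : 0 < rows) (hc : 0 < cols) :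
    MemGrid temp2 (pvGrid rows cols temp2) rows.toNat cols.toNat := by
  intro a b ha hb
  have er : rows = ((rows.toNat : Nat) : Int) := by omega
  have ec : cols = ((cols.toNat : Nat) : Int) := by omega
  rw [pvGet2_nat, pvGrid, er, ec, grid_row _ _ _ a ha, grid_entry _ _ b hb]

-- the whole tail of both functions agrees, for every rows/cols/temp2/shift
lemma core_eq (li lj rows cols : Int) (temp2 : List (Int × Int)) :
    (big_ones_square (pvGrid rows cols temp2)).map (fun i => (i.1 + li, i.2 + lj))
    = (let pts : PySem.Set (Int × Int) := PySem.Set.ofList temp2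
       let m : Int × Int × Int :=
         (PySem.List.pyRange 0 rows).foldl (fun acc i =>
           (PySem.List.pyRange 0 cols).foldl (fun acc j =>
             let k := pvSideB pts i j
             if acc.1 < k then (k, i, j) else acc) acc) (0, 0, 0)
       (PySem.List.pyRange m.2.1 (m.2.1 - m.1) (-1)).flatMap (fun a =>
         (PySem.List.pyRange m.2.2 (m.2.2 - m.1) (-1)).map (fun b =>
           (a + li, b + lj)))) := by
  by_cases hr : rows ≤ 0
  · -- no rows: the grid is empty, both sides return []
    have hA : pvGrid rows cols temp2 = #[] := by
      simp [pvGrid, PySem.List.pyRange_one_eq_nil hr]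
    have hbo : big_ones_square #[] = [] := by decide
    have hrg : PySem.List.pyRange 0 ((0:Int) - 0) (-1) = [] := by decide
    rw [hA, hbo]
    simp only [PySem.List.pyRange_one_eq_nil hr, List.foldl_nil, hrg, List.flatMap_nil,
      List.map_nil]
  · by_cases hc : cols ≤ 0
    · -- no cols: every grid row is empty, both sides return []
      have hsz : (pvGrid rows cols temp2).size = rows.toNat := by
        simp [pvGrid, PySem.List.length_pyRange_one]
      have hrow0 : ((pvGrid rows cols temp2)[0]?.getD #[]) = #[] := by
        rw [pvGrid, show rows = ((rows.toNat : Nat) : Int) by omega,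
          grid_row _ _ _ 0 (by omega), PySem.List.pyRange_one_eq_nil hc]
        rfl
      have hdg := S1_00_deg (pvGrid rows cols temp2) 0 (Or.inr rfl)
      simp only [S0m] at hdg
      have hrg : PySem.List.pyRange 0 ((0:Int) - 0) (-1) = [] := by decide
      simp only [big_ones_square, hrow0, Array.size_empty, Nat.cast_zero,
        PySem.List.pyRange_one_eq_nil (le_refl (0:Int)),
        PySem.List.pyRange_one_eq_nil (show (0:Int) ≤ 0 by norm_num),
        PySem.List.pyRange_one_eq_nil hc, List.foldl_nil, List.foldl_fixed]
      rw [show ((0:Nat):Int) = (0:Int) from rfl] at hdg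
      simp only [PySem.List.pyRange_one_eq_nil (le_refl (0:Int)), List.foldl_nil,
        List.foldl_fixed] at hdg
      rw [hdg]
      simp only [hrg, List.foldl_nil, List.flatMap_nil, List.map_nil]
    · -- the real case: positive grid
      rw [not_le] at hr hc
      generalize hA : pvGrid rows cols temp2 = arr
      have hsz : arr.size = rows.toNat := by
        rw [← hA]; simp [pvGrid, PySem.List.length_pyRange_one]
      have hC0 : ((arr[0]?).getD #[]).size = cols.toNat := by
        rw [← hA, pvGrid, show rows = ((rows.toNat : Nat) : Int) by omega,
          grid_row _ _ _ 0 (by omega)]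
        simp [PySem.List.length_pyRange_one]
      have H01 : ∀ i j : Int, pvGet2 arr i j = 0 ∨ pvGet2 arr i j = 1 := by
        rw [← hA]; exact grid_H01 rows cols temp2
      have hme : MemGrid (PySem.Set.ofList temp2) arr arr.size (((arr[0]?).getD #[]).size) := by
        intro a b ha hb
        have hg := grid_memgrid rows cols temp2 hr hc a b (by omega) (by omega)
        rw [hA] at hg
        rw [hg]
        by_cases hm : ((a:Int), (b:Int)) ∈ temp2
        · rw [if_pos hm, if_pos (by simpa [PySem.Set.mem_ofList] using hm)]
        · rw [if_neg hm, if_neg (by simpa [PySem.Set.mem_ofList] using hm)]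
      have erows : rows = (arr.size : Int) := by rw [hsz]; omega
      have ecols : cols = ((((arr[0]?).getD #[]).size : Nat) : Int) := by rw [hC0]; omega
      have hdpv := dp_values arr (((arr[0]?).getD #[]).size) H01
      simp only [S0m] at hdpv
      simp only [big_ones_square]
      rw [erows, ecols]
      set C0 := (((arr[0]?).getD #[]).size) with hC0def
      set S1e := (PySem.List.pyRange 1 (arr.size : Int)).foldl (fun S i =>
          (PySem.List.pyRange 1 (C0 : Int)).foldl (fun S j => pvDPstep arr S i j) S)
        (((PySem.List.pyRange 0 (arr.size : Int)).map (fun i =>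
          ((PySem.List.pyRange 0 (C0 : Int)).map (fun j =>
            if i = 0 ∨ j = 0 then pvGet2 arr i j else 0)).toArray)).toArray) with hS1
      have hfg : ∀ i j : Int, 0 ≤ i → i < (arr.size : Int) → 0 ≤ j → j < (C0 : Int) →
          pvGet2 S1e i j = pvSideB (PySem.Set.ofList temp2) i j := by
        intro i j h1 h2 h3 h4
        obtain ⟨a, rfl⟩ : ∃ a : Nat, i = (a : Int) := ⟨i.toNat, by omega⟩
        obtain ⟨b, rfl⟩ : ∃ b : Nat, j = (b : Int) := ⟨j.toNat, by omega⟩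
        rw [hS1, hdpv a b (by omega) (by omega),
          pvSideB_eq (PySem.Set.ofList temp2) arr arr.size C0 hme a b (by omega) (by omega)]
      have hf00 : 0 ≤ pvGet2 S1e 0 0 := by
        have h := hfg 0 0 le_rfl (by omega) le_rfl (by omega)
        rw [h]
        have h2 := pvSideB_eq (PySem.Set.ofList temp2) arr arr.size C0 hme 0 0 (by omega) (by omega)
        rw [show ((0:Nat):Int) = (0:Int) from rfl] at h2
        rw [h2]
        exact Int.natCast_nonneg _
      have hdeg : (arr.size : Int) ≤ 0 ∨ (C0 : Int) ≤ 0 → pvGet2 S1e 0 0 = 0 := by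
        intro h; exfalso; omega
      rw [scan_eq (arr.size : Int) (C0 : Int)
        (fun i j => pvGet2 S1e i j) (fun i j => pvSideB (PySem.Set.ofList temp2) i j)
        hfg hf00 hdeg]
      simp only [PySem.List.foldl_append_singleton_eq_map, PySem.List.foldl_append_eq_flatMap,
        List.nil_append, List.map_flatMap, List.map_map]
      rfl

-- ===== VERDICT (by name: the statement is the Claim_ definition above) =====
theorem find_big_square_spec : Claim_equal_find_big_square := by
  intro l _ _
  unfold Spec_find_big_square
  simp only [find_big_square, find_big_square_alt,
    PySem.List.foldl_append_singleton_eq_map, List.nil_append]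
  exact core_eq _ _ _ _ _
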